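-- pv_equiv track=rewrite | github.com/pypi-data/pypi-mirror-257 | packages/dict2dataframe/dict2dataframe-0.0.2.tar.gz/dict2dataframe-0.0.2/dict2dataframe/handlers.py | _get_nth_element
-- ===== SOURCE A (Python) =====
-- def _get_nth_element(
--     items: [(str, object)],
--     element: str,
--     nth: int = 1
-- ) -> ((str, object), bool):
--     """
--     Get nth element (occurrence) from items list.
--
--     Parameters
--     ----------
--     items: [(str, object)]
--         Items list.
--     element: str
--         Item key.
--     nth: int
--         Nth element position.
--
--     Returns
--     -------
--     ((str, object), bool)
--         Nth element, and whether it was not found.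
--     """
--     assert nth >= 1, f"'nth' ({nth}) must be >= 1."
--
--     occurrences = [i for i in items if i[0] == element]
--     n_occurrences = len(occurrences)
--
--     if n_occurrences:
--         index_out_of_bounds = True if nth > n_occurrences else False
--         nth_element = occurrences[min(nth, n_occurrences) - 1]
--     else:
--         nth_element = None
--         index_out_of_bounds = True
--
--     return nth_element, index_out_of_bounds
-- ===== SOURCE B (Python) =====
-- def _get_nth_element(
--     items: [(str, object)],
--     element: str,
--     nth: int = 1
-- ) -> ((str, object), bool):
--     """Single pass: count matches, remember the last one, return early at the nth."""
--     assert nth >= 1, f"'nth' ({nth}) must be >= 1."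
--
--     count = 0
--     last = None
--     for item in items:
--         if item[0] == element:
--             count += 1
--             last = item
--             if count == nth:
--                 return item, False
--
--     if count == 0:
--         return None, True
--     return last, True
-- ===== Notes on version B (the rewrite author's own statement) =====
-- stated objective: alternative
-- what changed: Replaces building the full list of occurrences and indexing into it by a single early-returning pass that keeps only a counter and the last match.
-- outside the precondition, e.g. on _get_nth_element([('a', 1)], 'a', 0): A raises AssertionError, B raises AssertionError
import Mathlib
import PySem

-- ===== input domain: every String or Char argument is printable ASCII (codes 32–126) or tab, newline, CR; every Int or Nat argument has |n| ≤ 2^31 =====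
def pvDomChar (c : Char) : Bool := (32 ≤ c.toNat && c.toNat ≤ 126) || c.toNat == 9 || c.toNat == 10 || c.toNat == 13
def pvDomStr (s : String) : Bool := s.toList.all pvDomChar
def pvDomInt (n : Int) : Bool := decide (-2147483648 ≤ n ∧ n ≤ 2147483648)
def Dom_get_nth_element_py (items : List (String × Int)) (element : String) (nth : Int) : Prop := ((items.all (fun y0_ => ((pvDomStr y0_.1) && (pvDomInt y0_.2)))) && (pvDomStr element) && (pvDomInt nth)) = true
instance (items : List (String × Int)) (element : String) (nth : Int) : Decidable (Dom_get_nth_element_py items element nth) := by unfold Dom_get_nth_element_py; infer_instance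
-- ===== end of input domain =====

-- B replaces A's "build the list of occurrences, then index it" by a single early-returning
-- pass keeping only a counter and the last match (alternative decomposition, same behaviour).


-- ===== PORT A =====
-- assert nth >= 1 is excluded by Pre_; occurrences[min(nth, n)-1] ported with pyGet?
def get_nth_element_py (items : List (String × Int)) (element : String) (nth : Int) : (Option (String × Int)) × Bool :=
  let occurrences := items.filter (fun i => i.1 == element)
  let n_occurrences : Int := occurrences.length
  if n_occurrences ≠ 0 then
    let index_out_of_bounds := if nth > n_occurrences then true else false
    let nth_element := PySem.List.pyGet? occurrences (min nth n_occurrences - 1)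
    (nth_element, index_out_of_bounds)
  else
    (none, true)

-- ===== PORT B =====
-- the for-loop of Source B with early return, as structural recursion over items
def altGo (element : String) (nth : Int) :
    List (String × Int) → Int → Option (String × Int) → (Option (String × Int)) × Bool
  | [], count, last => if count = 0 then (none, true) else (last, true)
  | item :: rest, count, last =>
    if item.1 == element then
      let count := count + 1
      let last := some item
      if count = nth then (some item, false)
      else altGo element nth rest count last
    else altGo element nth rest count last

def get_nth_element_py_alt (items : List (String × Int)) (element : String) (nth : Int) : (Option (String × Int)) × Bool :=
  altGo element nth items 0 none

-- ===== PRECONDITION & SPEC =====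
-- A's assert raises AssertionError for nth < 1; exactly those inputs are excluded.
def Pre_get_nth_element_py (items : List (String × Int)) (element : String) (nth : Int) : Prop := 1 ≤ nth
instance (items : List (String × Int)) (element : String) (nth : Int) : Decidable (Pre_get_nth_element_py items element nth) := by unfold Pre_get_nth_element_py; infer_instance
def pvWitness_get_nth_element_py : (List (String × Int)) × String × Int := ([("a", 1), ("b", 2), ("a", 3)], "a", 2)

def Spec_get_nth_element_py (items : List (String × Int)) (element : String) (nth : Int) (out : (Option (String × Int)) × Bool) : Prop := out = get_nth_element_py_alt items element nth
instance (items : List (String × Int)) (element : String) (nth : Int) (out : (Option (String × Int)) × Bool) : Decidable (Spec_get_nth_element_py items element nth out) := by unfold Spec_get_nth_element_py; infer_instance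

-- ===== CLAIM (what is proved, stated in full; the proofs are below) =====
def Claim_equal_get_nth_element_py : Prop := ∀ (items : List (String × Int)) (element : String) (nth : Int), Dom_get_nth_element_py items element nth → Pre_get_nth_element_py items element nth → Spec_get_nth_element_py items element nth (get_nth_element_py items element nth)

-- ===== LEMMAS AND PROOFS =====

-- Invariant of B's loop: with 0 ≤ count < nth and the not-yet-traversed items,
-- the loop's result is determined by the filtered suffix.
theorem altGo_spec (element : String) (nth : Int) :
    ∀ (items : List (String × Int)) (count : Int) (last : Option (String × Int)),
      0 ≤ count → count < nth →
      altGo element nth items count last =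
        (let occ := items.filter (fun i => i.1 == element)
         if nth - count ≤ (occ.length : Int) then
           (PySem.List.pyGet? occ (nth - count - 1), false)
         else if occ.length = 0 then
           (if count = 0 then (none, true) else (last, true))
         else
           (occ.getLast?, true)) := by
  intro items
  induction items with
  | nil =>
    intro count last h0 h1
    simp [altGo]
    omega
  | cons x rest ih =>
    intro count last h0 h1
    by_cases hm : x.1 == element
    · simp only [altGo, hm, if_true, List.filter_cons, hm]
      by_cases he : count + 1 = nth
      · have hocc : nth - count - 1 = 0 := by omega
        simp [he, hocc, PySem.List.pyGet?_zero_cons]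
        omega
      · simp only [he, if_false]
        rw [ih (count + 1) (some x) (by omega) (by omega)]
        simp only []
        set occf := rest.filter (fun i => i.1 == element) with hoccf
        by_cases hle : nth - (count + 1) ≤ (occf.length : Int)
        · have hle' : nth - count ≤ ((x :: occf).length : Int) := by
            simp; omega
          simp only [hle, if_true, hle', if_true]
          obtain ⟨m, hm2⟩ : ∃ m : ℕ, (m : Int) = nth - (count + 1) - 1 :=
            ⟨(nth - (count + 1) - 1).toNat, by omega⟩
          have hidx : nth - count - 1 = (m : Int) + 1 := by omega
          rw [hidx, PySem.List.pyGet?_cons_succ, hm2]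
        · have hgt : ¬ nth - count ≤ ((x :: occf).length : Int) := by
            simp; omega
          simp only [hle, if_false, hgt, if_false]
          by_cases hf : occf.length = 0
          · have : occf = [] := List.length_eq_zero_iff.mp hf
            simp [this]
            omega
          · have hne : occf ≠ [] := by
              intro h; rw [h] at hf; simp at hf
            simp only [hf, if_false]
            have hcz : ¬ (x :: occf).length = 0 := by simp
            simp only [hcz, if_false]
            obtain ⟨y, ys, hys⟩ := List.exists_cons_of_ne_nil hne
            rw [hys, List.getLast?_cons_cons]
    · simp only [altGo, hm, if_false, List.filter_cons, hm]
      exact ih count last h0 h1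

theorem pyGet?_len_sub_one_eq_getLast? (l : List (String × Int)) (h : l ≠ []) :
    PySem.List.pyGet? l ((l.length : Int) - 1) = l.getLast? := by
  have hlen : 0 < l.length := List.length_pos_iff.mpr h
  have hidx : (l.length : Int) - 1 = ((l.length - 1 : ℕ) : Int) := by omega
  rw [hidx, PySem.List.pyGet?_natCast, List.getLast?_eq_getElem?]

-- ===== VERDICT (by name: the statement is the Claim_ definition above) =====
theorem get_nth_element_py_spec : Claim_equal_get_nth_element_py := by
  intro items element nth _ hpre
  unfold Spec_get_nth_element_py get_nth_element_py get_nth_element_py_alt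
  have hpre' : (1 : Int) ≤ nth := hpre
  rw [altGo_spec element nth items 0 none le_rfl (by omega)]
  simp only []
  set occ := items.filter (fun i => i.1 == element) with hocc
  by_cases hz : occ.length = 0
  · have : ((occ.length : Int)) = 0 := by exact_mod_cast hz
    simp [this, hz]
    omega
  · have hne : occ ≠ [] := by
      intro h; rw [h] at hz; simp at hz
    have hpos : (0 : Int) < (occ.length : Int) := by
      have := List.length_pos_iff.mpr hne; exact_mod_cast this
    have hz' : ((occ.length : Int)) ≠ 0 := by omega
    simp only [hz', if_true, ne_eq, not_true_eq_false, hz, if_false]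
    by_cases hle : nth - 0 ≤ (occ.length : Int)
    · have hmin : min nth (occ.length : Int) = nth := by omega
      have hngt : ¬ nth > (occ.length : Int) := by omega
      simp [hle, hmin, hngt]
    · have hmin : min nth (occ.length : Int) = (occ.length : Int) := by omega
      have hgt : nth > (occ.length : Int) := by omega
      simp only [hle, if_false, hmin, hgt, if_true, not_false_iff]
      rw [pyGet?_len_sub_one_eq_getLast? occ hne]
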